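-- pv_equiv track=rewrite | github.com/volchey/handwritten_font | alphabet_segmentation.py | sort_contours
-- ===== SOURCE A (Python) =====
-- def sort_contours(contours_info, row_threshold=300):
--     """
--     Organizes contours into a matrix based on their positions.
--
--     Parameters:
--         contours_info (list): List of contour dictionaries.
--         row_threshold (int): Vertical distance threshold to group contours into the same row.
--
--     Returns:
--         List[List[dict]]: Matrix of contours organized as rows and columns.
--     """
--     # Sort contours by their top coordinate (extTop[1])
--     contours_info_sorted = sorted(contours_info, key=lambda c: c['extTop'][1])
--
--     rows = []
--     current_row = []
--     last_top = None
--
--     for info in contours_info_sorted: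
--         current_top = info['extTop'][1]
--         if last_top is None:
--             last_top = current_top
--             current_row.append(info)
--         elif abs(current_top - last_top) < row_threshold:
--             current_row.append(info)
--         else:
--             # Sort current row left to right based on extLeft[0]
--             current_row.sort(key=lambda c: c['extLeft'][0])
--             rows.append(current_row)
--             current_row = [info]
--             last_top = current_top
--
--     # Add the last row
--     if current_row:
--         current_row.sort(key=lambda c: c['extLeft'][0])
--         rows.append(current_row)
--
--     result = []
--     for row in rows:
--         result.extend(row)
--
--     return result
-- ===== SOURCE B (Python) =====
-- def sort_contours(contours_info, row_threshold=300):
--     remaining = sorted(contours_info, key=lambda c: c['extTop'][1])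
--     out = []
--     while remaining:
--         anchor = remaining[0]['extTop'][1]
--         k = 1
--         while k < len(remaining) and abs(remaining[k]['extTop'][1] - anchor) < row_threshold:
--             k += 1
--         out += sorted(remaining[:k], key=lambda c: c['extLeft'][0])
--         remaining = remaining[k:]
--     return out
-- ===== Notes on version B (the rewrite author's own statement) =====
-- stated objective: simpler
-- what changed: Replaces A's three-accumulator state machine (rows / current_row / last_top, plus an after-loop flush of the last row and a final flatten pass) by a single loop that repeatedly splits the next row off the front of the top-sorted list (anchor = the row's first top, fixed for the row) and appends it sorted left-to-right.
import Mathlib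
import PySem

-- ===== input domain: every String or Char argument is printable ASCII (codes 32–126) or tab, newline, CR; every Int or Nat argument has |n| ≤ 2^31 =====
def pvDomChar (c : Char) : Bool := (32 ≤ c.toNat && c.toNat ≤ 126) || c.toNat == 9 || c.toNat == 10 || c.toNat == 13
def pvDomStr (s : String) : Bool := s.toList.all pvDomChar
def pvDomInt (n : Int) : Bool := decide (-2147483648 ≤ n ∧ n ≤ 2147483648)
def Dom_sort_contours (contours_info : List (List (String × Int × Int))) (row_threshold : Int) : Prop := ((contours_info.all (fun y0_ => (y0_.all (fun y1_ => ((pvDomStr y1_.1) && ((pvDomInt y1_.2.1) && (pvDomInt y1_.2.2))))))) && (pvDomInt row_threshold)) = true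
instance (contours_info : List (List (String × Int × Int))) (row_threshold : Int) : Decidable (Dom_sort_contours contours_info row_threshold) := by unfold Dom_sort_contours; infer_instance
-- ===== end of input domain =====

-- B replaces A's three-accumulator state machine (rows / current_row / last_top) plus a final
-- flatten by a loop that repeatedly splits the next row off the front of the top-sorted list
-- (anchor = the row's first top, never updated inside a row) and emits it sorted left-to-right;
-- objective: simpler (shorter, no trailing-row special case). Return value only; no mutation issues
-- beyond A's in-place sort of its own temporaries.

-- ===== PORT A =====
-- shared key helpers: c['extTop'][1] and c['extLeft'][0] (total via a default; Pre_ guarantees the key is present)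
def pvTop (c : List (String × Int × Int)) : Int :=
  (PySem.Dict.getD (PySem.Dict.mk c) "extTop" (0, 0)).2
def pvLeft (c : List (String × Int × Int)) : Int :=
  (PySem.Dict.getD (PySem.Dict.mk c) "extLeft" (0, 0)).1

-- the body of A's for-loop over contours_info_sorted (state = (rows, current_row, last_top))
def pvStepA (row_threshold : Int)
    (st : List (List (List (String × Int × Int))) × List (List (String × Int × Int)) × Option Int)
    (info : List (String × Int × Int)) :
    List (List (List (String × Int × Int))) × List (List (String × Int × Int)) × Option Int :=
  let rows := st.1
  let current_row := st.2.1
  let last_top := st.2.2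
  let current_top := pvTop info
  match last_top with
  | none => (rows, current_row ++ [info], some current_top)
  | some lt =>
    if |current_top - lt| < row_threshold then
      (rows, current_row ++ [info], some lt)
    else
      (rows ++ [PySem.List.sorted current_row (fun c => pvLeft c) false], [info], some current_top)

def sort_contours (contours_info : List (List (String × Int × Int))) (row_threshold : Int) : List (List (String × Int × Int)) :=
  let contours_info_sorted := PySem.List.sorted contours_info (fun c => pvTop c) false
  let st := contours_info_sorted.foldl (pvStepA row_threshold) ([], [], none)
  let rows := if st.2.1.isEmpty then st.1
              else st.1 ++ [PySem.List.sorted st.2.1 (fun c => pvLeft c) false]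
  rows.foldl (fun acc row => acc ++ row) []

-- ===== PORT B =====
-- Source B's outer while loop: split the row (prefix sharing the head's anchor) off the front,
-- emit it sorted by extLeft[0], continue with the rest (the inner index scan k is takeWhile/dropWhile)
def pvRowsB (row_threshold : Int) : List (List (String × Int × Int)) → List (List (String × Int × Int))
  | [] => []
  | c :: rest =>
    let anchor := pvTop c
    PySem.List.sorted (c :: rest.takeWhile (fun d => decide (|pvTop d - anchor| < row_threshold)))
        (fun d => pvLeft d) false
      ++ pvRowsB row_threshold (rest.dropWhile (fun d => decide (|pvTop d - anchor| < row_threshold)))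
  termination_by cs => cs.length
  decreasing_by
    simpa using Nat.lt_succ_of_le (List.length_dropWhile_le _ _)

def sort_contours_alt (contours_info : List (List (String × Int × Int))) (row_threshold : Int) : List (List (String × Int × Int)) :=
  pvRowsB row_threshold (PySem.List.sorted contours_info (fun c => pvTop c) false)

-- ===== PRECONDITION & SPEC =====
-- Pre_ excludes contours missing an 'extTop' or 'extLeft' key, on which the Python A raises KeyError.
def Pre_sort_contours (contours_info : List (List (String × Int × Int))) (row_threshold : Int) : Prop :=
  ∀ c ∈ contours_info, (c.any (fun kv => kv.1 == "extTop")) ∧ (c.any (fun kv => kv.1 == "extLeft"))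
instance (contours_info : List (List (String × Int × Int))) (row_threshold : Int) : Decidable (Pre_sort_contours contours_info row_threshold) := by unfold Pre_sort_contours; infer_instance

def pvWitness_sort_contours : (List (List (String × Int × Int))) × Int :=
  ([[("extTop", 5, 10), ("extLeft", 3, 4)], [("extTop", 1, 2), ("extLeft", 7, 8)]], 300)

def Spec_sort_contours (contours_info : List (List (String × Int × Int))) (row_threshold : Int) (out : List (List (String × Int × Int))) : Prop := out = sort_contours_alt contours_info row_threshold
instance (contours_info : List (List (String × Int × Int))) (row_threshold : Int) (out : List (List (String × Int × Int))) : Decidable (Spec_sort_contours contours_info row_threshold out) := by unfold Spec_sort_contours; infer_instance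

-- ===== CLAIM (what is proved, stated in full; the proofs are below) =====
def Claim_equal_sort_contours : Prop := ∀ (contours_info : List (List (String × Int × Int))) (row_threshold : Int), Dom_sort_contours contours_info row_threshold → Pre_sort_contours contours_info row_threshold → Spec_sort_contours contours_info row_threshold (sort_contours contours_info row_threshold)

-- ===== LEMMAS AND PROOFS =====

-- invariant of A's loop: mid-row state (rows, cur, some lt) with cur ≠ [] finishes to
-- flattened rows, then the completed current row, then B's grouping of the remainder
lemma pvLoopA_eq (thr : Int) (s : List (List (String × Int × Int)))
    (rows : List (List (List (String × Int × Int)))) (cur : List (List (String × Int × Int)))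
    (lt : Int) (hc : cur ≠ []) :
    List.foldl (fun acc row => acc ++ row) []
      (if (s.foldl (pvStepA thr) (rows, cur, some lt)).2.1.isEmpty then
        (s.foldl (pvStepA thr) (rows, cur, some lt)).1
       else
        (s.foldl (pvStepA thr) (rows, cur, some lt)).1
          ++ [PySem.List.sorted (s.foldl (pvStepA thr) (rows, cur, some lt)).2.1 (fun c => pvLeft c) false]) =
    rows.flatten
      ++ PySem.List.sorted (cur ++ s.takeWhile (fun d => decide (|pvTop d - lt| < thr))) (fun d => pvLeft d) false
      ++ pvRowsB thr (s.dropWhile (fun d => decide (|pvTop d - lt| < thr))) := by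
  induction s generalizing rows cur lt with
  | nil =>
    simp [pvRowsB, List.isEmpty_eq_false_iff.mpr hc, PySem.List.foldl_append_eq_flatten]
  | cons d s' ih =>
    simp only [List.foldl_cons, pvStepA, List.takeWhile_cons, List.dropWhile_cons]
    by_cases h : |pvTop d - lt| < thr
    · simp only [h, decide_true, ite_true]
      rw [ih _ (cur ++ [d]) lt (by simp)]
      simp [List.append_assoc]
    · simp only [h, decide_false, ite_false, Bool.false_eq_true]
      rw [ih _ [d] (pvTop d) (by simp)]
      simp [pvRowsB, List.append_assoc]

-- ===== VERDICT (by name: the statement is the Claim_ definition above) =====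
theorem sort_contours_spec : Claim_equal_sort_contours := by
  intro contours_info row_threshold _ _
  unfold Spec_sort_contours sort_contours sort_contours_alt
  cases hs : PySem.List.sorted contours_info (fun c => pvTop c) false with
  | nil => simp [pvRowsB]
  | cons c s' =>
    simp only [List.foldl_cons, pvStepA, List.nil_append]
    rw [pvLoopA_eq row_threshold s' [] [c] (pvTop c) (by simp)]
    simp [pvRowsB]
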